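-- pv_equiv track=rewrite | github.com/Salamamder/algotithm | python/Dynamic_Programming/DynamicPrograming.py | card
-- ===== SOURCE A (Python) =====
-- card_price= [1,5,6,7]
--
-- def card(n):
--     one, two, three, four = 0, 0, 0, 0
--     arr = [0, 1, 5, 6, 10]
--     if n < 5:
--         return arr[n]
--     for i in range(5, n+1):
--         arr.append(max(arr[i-1]+card_price[0], arr[i-2]+card_price[1], arr[i-3]+card_price[2], arr[i-4]+card_price[3]))
--     return arr[n]
-- ===== SOURCE B (Python) =====
-- def card(n):
--     # closed form of the DP: optimal is as many 2-packs (value 5) as possible,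
--     # plus one 1-card if n is odd
--     return 5 * (n // 2) + n % 2
-- ===== Notes on version B (the rewrite author's own statement) =====
-- stated objective: faster
-- what changed: Replaces the O(n) table-building DP over card values with the closed form 5*(n//2) + n%2 (the DP's optimum is always floor(n/2) value-5 pairs plus one value-1 card for odd n).
-- intended difference: For -5 <= n < 0, A returns a value from the DP seed table via accidental negative-index wraparound (e.g. card(-1)=10); B returns the closed form 5*(n//2)+n%2 (e.g. -4), which is the consistent extension rather than an indexing accident. — e.g. on card(-1): A returns 10, B returns -4
import Mathlib
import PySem

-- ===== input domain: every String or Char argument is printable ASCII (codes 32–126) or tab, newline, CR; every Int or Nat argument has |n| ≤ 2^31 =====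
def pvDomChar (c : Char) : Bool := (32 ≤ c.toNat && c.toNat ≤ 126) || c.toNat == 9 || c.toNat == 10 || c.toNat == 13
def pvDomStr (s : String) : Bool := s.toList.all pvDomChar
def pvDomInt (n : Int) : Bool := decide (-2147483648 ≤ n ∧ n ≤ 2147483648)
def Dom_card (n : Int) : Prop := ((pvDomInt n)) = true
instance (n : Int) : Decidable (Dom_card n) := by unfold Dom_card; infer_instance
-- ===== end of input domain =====

-- B replaces A's O(n) DP table with the closed form 5*(n//2) + n%2 (faster: asymptotic);
-- on -5 <= n < 0 A's value is an accidental negative-index read of the seed table, B returns the closed form (D_card).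


-- ===== PORT A =====
-- one step of the loop body: arr.append(max(arr[i-1]+1, arr[i-2]+5, arr[i-3]+6, arr[i-4]+7))
def cardStep (arr : List Int) (i : Int) : List Int :=
  arr ++ [max (max ((PySem.List.pyGet? arr (i-1)).getD 0 + 1)
               ((PySem.List.pyGet? arr (i-2)).getD 0 + 5))
          (max ((PySem.List.pyGet? arr (i-3)).getD 0 + 6)
               ((PySem.List.pyGet? arr (i-4)).getD 0 + 7))]

def card (n : Int) : Int :=
  if n < 5 then (PySem.List.pyGet? [0, 1, 5, 6, 10] n).getD 0
  else
    (PySem.List.pyGet? ((PySem.List.pyRange 5 (n+1) 1).foldl cardStep [0, 1, 5, 6, 10]) n).getD 0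

-- ===== PORT B =====
def card_alt (n : Int) : Int :=
  5 * PySem.Int.floordiv n 2 + PySem.Int.mod n 2

-- ===== PRECONDITION & SPEC =====
-- Pre_card excludes n < -5, exactly where the Python A raises IndexError (arr[n] past the seed table); B returns the closed form there.
def Pre_card (n : Int) : Prop := -5 ≤ n
instance (n : Int) : Decidable (Pre_card n) := by unfold Pre_card; infer_instance
def pvWitness_card : Int := 7

-- On -5 ≤ n < 0 A returns a seed-table value through Python's negative-index wraparound (e.g. card(-1) = 10),
-- while B returns the closed form 5*(n//2)+n%2 (e.g. -4), the consistent extension rather than an indexing accident.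
def D_card (n : Int) : Prop := -5 ≤ n ∧ n < 0
instance (n : Int) : Decidable (D_card n) := by unfold D_card; infer_instance
def Spec_card (n : Int) (out : Int) : Prop := ¬ D_card n → out = card_alt n
instance (n : Int) (out : Int) : Decidable (Spec_card n out) := by unfold Spec_card; infer_instance
def pvDiffWitness_card : Int := -1
def pvDiffWitnessOut_card : Int × Int := (10, -4)

-- ===== CLAIM (what is proved, stated in full; the proofs are below) =====
def Claim_unchanged_card : Prop := ∀ (n : Int), Dom_card n → Pre_card n → Spec_card n (card n)
def Claim_changed_card : Prop := Dom_card (pvDiffWitness_card) ∧ Pre_card (pvDiffWitness_card) ∧ D_card (pvDiffWitness_card) ∧ card (pvDiffWitness_card) = pvDiffWitnessOut_card.1 ∧ card_alt (pvDiffWitness_card) = pvDiffWitnessOut_card.2 ∧ pvDiffWitnessOut_card.1 ≠ pvDiffWitnessOut_card.2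
def Claim_exact_card : Prop := ∀ (n : Int), Dom_card n → Pre_card n → D_card n → card n ≠ card_alt n

-- ===== LEMMAS AND PROOFS =====
-- closed form as a function of a natural number
def gClosed (i : Nat) : Int := 5 * ((i / 2 : Nat) : Int) + ((i % 2 : Nat) : Int)

-- invariant of A's loop: after running over range(5, 5+k) the table has length 5+k and holds the closed form
theorem card_loop_inv (k : Nat) :
    ((PySem.List.pyRange 5 (5 + (k : Int)) 1).foldl cardStep [0, 1, 5, 6, 10]).length = 5 + k ∧
    ∀ i, i < 5 + k →
      ((PySem.List.pyRange 5 (5 + (k : Int)) 1).foldl cardStep [0, 1, 5, 6, 10])[i]? = some (gClosed i) := by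
  induction k with
  | zero =>
    rw [PySem.List.pyRange_one_eq_nil (by omega)]
    refine ⟨rfl, ?_⟩
    intro i h
    interval_cases i <;> decide
  | succ k ih =>
    obtain ⟨hlen, hval⟩ := ih
    set prev := (PySem.List.pyRange 5 (5 + (k : Int)) 1).foldl cardStep [0, 1, 5, 6, 10] with hprev
    have hsplit : PySem.List.pyRange 5 (5 + ((k + 1 : Nat) : Int)) 1
        = PySem.List.pyRange 5 (5 + (k : Int)) 1 ++ [5 + (k : Int)] := by
      have h1 : (5 + ((k + 1 : Nat) : Int)) = (5 + (k : Int)) + 1 := by push_cast; ring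
      rw [h1, PySem.List.pyRange_one_succ_right (by omega)]
    rw [hsplit, List.foldl_append, ← hprev]
    constructor
    · simp only [List.foldl_cons, List.foldl_nil, cardStep, List.length_append,
        List.length_singleton, hlen]
      omega
    · intro i h
      simp only [List.foldl_cons, List.foldl_nil, cardStep]
      rcases Nat.lt_or_ge i (5 + k) with hi | hi
      · rw [List.getElem?_append_left (by omega)]
        exact hval i hi
      · have hieq : i = 5 + k := by omega
        subst hieq
        rw [List.getElem?_append_right (by omega)]
        have hz : 5 + k - prev.length = 0 := by omega
        rw [hz]
        simp only [List.getElem?_cons_zero, Option.some.injEq]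
        have e1 : (5:Int) + (k:Int) - 1 = ((4 + k : Nat) : Int) := by push_cast; ring
        have e2 : (5:Int) + (k:Int) - 2 = ((3 + k : Nat) : Int) := by push_cast; ring
        have e3 : (5:Int) + (k:Int) - 3 = ((2 + k : Nat) : Int) := by push_cast; ring
        have e4 : (5:Int) + (k:Int) - 4 = ((1 + k : Nat) : Int) := by push_cast; ring
        rw [e1, e2, e3, e4]
        simp only [PySem.List.pyGet?_natCast]
        rw [hval (4 + k) (by omega), hval (3 + k) (by omega),
            hval (2 + k) (by omega), hval (1 + k) (by omega)]
        simp only [Option.getD_some, gClosed]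
        push_cast
        omega

theorem card_eq_closed (n : Int) (hn : 0 ≤ n) : card n = gClosed n.toNat := by
  rcases Int.lt_or_le n 5 with h5 | h5
  · have hn5 : n.toNat < 5 := by omega
    unfold card
    rw [if_pos h5]
    have hcast : n = ((n.toNat : Nat) : Int) := by omega
    rw [hcast, PySem.List.pyGet?_natCast]
    interval_cases h : n.toNat <;> decide
  · unfold card
    rw [if_neg (by omega)]
    obtain ⟨hlen, hval⟩ := card_loop_inv (n - 4).toNat
    have hrange : n + 1 = 5 + (((n - 4).toNat : Nat) : Int) := by omega
    rw [hrange]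
    rw [PySem.List.pyGet?_of_nonneg _ hn, hval n.toNat (by omega)]
    rfl

theorem card_alt_eq_closed (n : Int) (hn : 0 ≤ n) : card_alt n = gClosed n.toNat := by
  unfold card_alt gClosed
  rw [PySem.Int.floordiv_eq_ediv_of_pos (by omega), PySem.Int.mod_eq_emod_of_pos (by omega)]
  omega

-- ===== VERDICT (by name: the statement is the Claim_ definition above) =====
theorem card_spec : Claim_unchanged_card := by
  intro n _ hpre hd
  unfold Pre_card at hpre
  unfold D_card at hd
  have hn : 0 ≤ n := by omega
  rw [card_eq_closed n hn, card_alt_eq_closed n hn]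

theorem card_changed : Claim_changed_card := by unfold Claim_changed_card; decide

theorem card_tight : Claim_exact_card := by
  intro n _ _ hd
  unfold D_card at hd
  obtain ⟨h1, h2⟩ := hd
  interval_cases n <;> decide
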